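-- pv_equiv track=rewrite | github.com/owenyang123/mypython | leetcode/pingq1.py | job
-- ===== SOURCE A (Python) =====
-- s="A good sorting algorithm"
--
-- def job(s):
--     res, rest, set1 = "", "", set()
--     if len(s)==1:return s
--     for c in s:
--         if c not in set1:
--             set1.add(c)
--             res += c
--         else:
--             rest += c
--     res = "".join(sorted(res))
--     if rest!="":return res+job(rest)
--     return res
-- ===== SOURCE B (Python) =====
-- def job(s):
--     counts = {}
--     for c in s:
--         counts[c] = counts.get(c, 0) + 1
--     chars = sorted(counts)
--     maxf = max(counts.values()) if counts else 0
--     out = []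
--     for i in range(maxf):
--         for c in chars:
--             if counts[c] > i:
--                 out.append(c)
--     return "".join(out)
-- ===== Notes on version B (the rewrite author's own statement) =====
-- stated objective: faster
-- what changed: Instead of A's recursion that re-scans and re-sorts the remaining string once per layer (sorting the distinct chars each round), B counts character frequencies once in a single pass, sorts the distinct characters once, and emits layer i as the sorted chars with count > i.
import Mathlib
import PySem

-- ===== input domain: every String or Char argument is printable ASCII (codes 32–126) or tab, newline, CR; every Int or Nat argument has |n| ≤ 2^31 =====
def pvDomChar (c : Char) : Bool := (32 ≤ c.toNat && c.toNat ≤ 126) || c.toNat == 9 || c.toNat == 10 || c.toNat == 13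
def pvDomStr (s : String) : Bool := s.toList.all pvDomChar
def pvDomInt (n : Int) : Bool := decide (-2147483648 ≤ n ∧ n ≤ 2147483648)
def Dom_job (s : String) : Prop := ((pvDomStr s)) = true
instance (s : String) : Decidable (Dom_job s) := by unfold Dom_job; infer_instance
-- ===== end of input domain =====

-- B replaces A's per-layer re-scan-and-re-sort recursion by a single frequency count plus one sort
-- of the distinct characters, emitting layer i as the sorted chars with count > i (objective: faster).

-- ===== PORT A =====
-- helpers for port A: the loop body, and the lemmas its termination proof cites
def jobStep (st : List Char × List Char × PySem.Set Char) (c : Char) :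
    List Char × List Char × PySem.Set Char :=
  if st.2.2.contains c = false then (st.1 ++ [c], st.2.1, PySem.Set.add st.2.2 c)
  else (st.1, st.2.1 ++ [c], st.2.2)

def newFirsts (seen : PySem.Set Char) : List Char → List Char
  | [] => []
  | c :: t => if seen.contains c then newFirsts seen t else c :: newFirsts (PySem.Set.add seen c) t

def others (seen : PySem.Set Char) : List Char → List Char
  | [] => []
  | c :: t => if seen.contains c then c :: others seen t else others (PySem.Set.add seen c) t

lemma split_eq (l : List Char) : ∀ res rest seen,
    l.foldl jobStep (res, rest, seen) =
      (res ++ newFirsts seen l, rest ++ others seen l, PySem.Set.update seen l) := by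
  induction l with
  | nil => intro res rest seen; simp [newFirsts, others, PySem.Set.update]
  | cons c t ih =>
    intro res rest seen
    simp only [List.foldl_cons, jobStep]
    by_cases h : c ∈ seen
    · simp [h, newFirsts, others, ih, PySem.Set.update, PySem.Set.add]
    · simp [h, newFirsts, others, ih, PySem.Set.update, PySem.Set.add]

lemma split_len (l : List Char) : ∀ seen,
    (newFirsts seen l).length + (others seen l).length = l.length := by
  induction l with
  | nil => intro seen; simp [newFirsts, others]
  | cons c t ih =>
    intro seen
    by_cases h : c ∈ seen
    · have := ih seen; simp [newFirsts, others, h]; omega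
    · have := ih (PySem.Set.add seen c)
      rw [show PySem.Set.add seen c = seen ++ [c] from by simp [PySem.Set.add, h]] at this
      simp [newFirsts, others, h]; omega

lemma others_lt (l : List Char) (h : others PySem.Set.empty l ≠ []) :
    (others PySem.Set.empty l).length < l.length := by
  have hl := split_len l PySem.Set.empty
  cases l with
  | nil => simp [others] at h
  | cons c t =>
    have : newFirsts PySem.Set.empty (c :: t) ≠ [] := by
      simp [newFirsts, PySem.Set.empty]
    cases hn : newFirsts PySem.Set.empty (c :: t) with
    | nil => exact absurd hn this
    | cons a b => rw [hn] at hl; simp at hl ⊢; omega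

def jobA (l : List Char) : List Char :=
  if l.length = 1 then l
  else
    let st := l.foldl jobStep ([], [], PySem.Set.empty)
    let res := PySem.List.sorted st.1 (fun c => c) false
    if st.2.1 ≠ [] then res ++ jobA st.2.1 else res
termination_by l.length
decreasing_by
  rename_i h
  have he : st.2.1 = others PySem.Set.empty l := by
    simp only [st, List.foldl_attach]
    rw [split_eq l [] [] PySem.Set.empty]; simp
  rw [he] at h ⊢
  exact others_lt l h

def job (s : String) : String := String.mk (jobA s.toList)


-- ===== PORT B =====
def job_alt (s : String) : String :=
  let counts := s.toList.foldl (fun d c => d.insert c (d.getD c 0 + 1)) PySem.Dict.empty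
  let chars := PySem.List.sorted counts.keys (fun c => c) false
  let maxf : Int :=
    match PySem.List.max? counts.values (fun v => v) with
    | some m => m
    | none => 0
  let out := (PySem.List.pyRange 0 maxf 1).foldl (fun acc i =>
    chars.foldl (fun acc c => if counts.getD c 0 > i then acc ++ [c] else acc) acc) []
  String.mk out

-- ===== PRECONDITION & SPEC =====
def Spec_job (s : String) (out : String) : Prop := out = job_alt s
instance (s : String) (out : String) : Decidable (Spec_job s out) := by unfold Spec_job; infer_instance

-- ===== CLAIM (what is proved, stated in full; the proofs are below) =====
def Claim_equal_job : Prop := ∀ (s : String), Dom_job s → Spec_job s (job s)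

-- ===== LEMMAS AND PROOFS =====
lemma update_eq_append (l : List Char) : ∀ seen : PySem.Set Char,
    PySem.Set.update seen l = seen ++ newFirsts seen l := by
  induction l with
  | nil => intro seen; simp [newFirsts, PySem.Set.update]
  | cons c t ih =>
    intro seen
    by_cases h : c ∈ seen
    · have := ih seen
      simp only [PySem.Set.update, List.foldl_cons] at *
      simp [newFirsts, h, PySem.Set.add, this]
    · have := ih (PySem.Set.add seen c)
      rw [show PySem.Set.add seen c = seen ++ [c] from by simp [PySem.Set.add, h]] at this
      simp only [PySem.Set.update, List.foldl_cons] at *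
      simp [newFirsts, h, PySem.Set.add, this]


lemma newFirsts_nil_eq_dedup (l : List Char) : newFirsts PySem.Set.empty l = PySem.List.dedup l := by
  have h := update_eq_append l PySem.Set.empty
  simpa [PySem.Set.empty, PySem.List.dedup, PySem.Set.ofList, PySem.Set.update] using h.symm


lemma count_split (l : List Char) (x : Char) : ∀ seen,
    (newFirsts seen l).count x + (others seen l).count x = l.count x := by
  induction l with
  | nil => intro seen; simp [newFirsts, others]
  | cons c t ih =>
    intro seen
    by_cases h : c ∈ seen
    · have := ih seen
      simp [newFirsts, others, h, List.count_cons]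
      omega
    · have := ih (PySem.Set.add seen c)
      rw [show PySem.Set.add seen c = seen ++ [c] from by simp [PySem.Set.add, h]] at this
      simp [newFirsts, others, h, List.count_cons]
      omega



def S (l : List Char) : List Char := PySem.List.sorted (PySem.List.dedup l) (fun c => c) false

def layer (l : List Char) (i : Int) : List Char :=
  (S l).filter (fun c => decide (i < (l.count c : Int)))

def F (l : List Char) (M : Int) : List Char :=
  (PySem.List.pyRange 0 M 1).flatMap (fun i => layer l i)

lemma S_nodup (l : List Char) : (S l).Nodup := by
  unfold S
  exact ((PySem.List.sorted_perm _ _ _).symm).nodup (PySem.List.nodup_dedup l)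

lemma S_pairwise (l : List Char) : (S l).Pairwise (· < ·) := by
  have := PySem.List.sorted_ofList_pairwise_lt (xs := l)
  simpa [S, PySem.List.dedup_eq_ofList] using this

lemma mem_S (l : List Char) (c : Char) : c ∈ S l ↔ c ∈ l := by
  rw [S, PySem.List.mem_sorted, PySem.List.mem_dedup]

lemma count_dedup (l : List Char) (x : Char) :
    (PySem.List.dedup l).count x = if x ∈ l then 1 else 0 := by
  by_cases h : x ∈ l
  · rw [List.count_eq_one_of_mem (PySem.List.nodup_dedup l) ((PySem.List.mem_dedup l x).mpr h), if_pos h]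
  · rw [List.count_eq_zero_of_not_mem (fun hc => h ((PySem.List.mem_dedup l x).mp hc)), if_neg h]

lemma count_others (l : List Char) (x : Char) :
    (others PySem.Set.empty l).count x = l.count x - (if x ∈ l then 1 else 0) := by
  have h := count_split l x PySem.Set.empty
  rw [newFirsts_nil_eq_dedup, count_dedup] at h
  by_cases hx : x ∈ l
  · rw [if_pos hx] at h ⊢; omega
  · rw [if_neg hx] at h ⊢; omega

lemma mem_others (l : List Char) (x : Char) :
    x ∈ others PySem.Set.empty l ↔ 2 ≤ l.count x := by
  rw [← List.count_pos_iff, count_others]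
  by_cases hx : x ∈ l
  · have h1 : 1 ≤ l.count x := List.count_pos_iff.mpr hx
    rw [if_pos hx]; omega
  · have h0 : l.count x = 0 := List.count_eq_zero_of_not_mem hx
    rw [if_neg hx]; omega

lemma S_others (l : List Char) :
    S (others PySem.Set.empty l) = (S l).filter (fun c => decide ((1 : Int) < (l.count c : Int))) := by
  apply PySem.List.sorted_eq_of_perm_of_pairwise_lt
  · rw [List.perm_ext_iff_of_nodup ((S_nodup _).filter _) (PySem.List.nodup_dedup _)]
    intro a
    rw [List.mem_filter, PySem.List.mem_dedup _ a, mem_others, mem_S]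
    constructor
    · rintro ⟨_, h2⟩
      simp only [decide_eq_true_eq] at h2; omega
    · intro h
      have hc : (1 : Int) < (l.count a : Int) := by exact_mod_cast h
      exact ⟨List.count_pos_iff.mp (by omega), by simpa using hc⟩
  · exact (S_pairwise l).filter _

lemma layer_zero (l : List Char) : layer l 0 = S l := by
  unfold layer
  apply List.filter_eq_self.mpr
  intro c hc
  have : c ∈ l := (mem_S l c).mp hc
  have : 1 ≤ l.count c := List.count_pos_iff.mpr this
  simp; omega

lemma F_nil (M : Int) : F [] M = [] := by
  unfold F layer S
  simp [PySem.List.dedup]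

lemma layer_shift (l : List Char) (i : Int) (hi : 0 ≤ i) :
    layer (others PySem.Set.empty l) i = layer l (i + 1) := by
  unfold layer
  rw [S_others, List.filter_filter]
  apply List.filter_congr
  intro c hc
  have hcl : c ∈ l := (mem_S l c).mp hc
  have h1 : 1 ≤ l.count c := List.count_pos_iff.mpr hcl
  rw [count_others, if_pos hcl]
  have : ((l.count c - 1 : Nat) : Int) = (l.count c : Int) - 1 := by omega
  rw [this]
  by_cases h2 : i + 1 < ((l.count c : Int)) <;> simp [h2] <;> omega

lemma F_decomp (l : List Char) (M : Int) (hM : 1 ≤ M) :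
    F l M = S l ++ F (others PySem.Set.empty l) (M - 1) := by
  unfold F
  rw [PySem.List.pyRange_one_cons (by omega : (0:Int) < M), List.flatMap_cons, layer_zero]
  congr 1
  have h01 : (0 : Int) + 1 = 1 := by norm_num
  rw [h01, PySem.List.pyRange_one (1 : Int) M, PySem.List.pyRange_one (0 : Int) (M - 1)]
  have ht : (M - 1 - 0).toNat = (M - 1).toNat := by omega
  rw [ht, List.flatMap_map, List.flatMap_map]
  apply List.flatMap_congr
  intro k _
  have := layer_shift l (k : Int) (by positivity)
  rw [show (0 : Int) + (k : Int) = (k : Int) by ring, this,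
      show (1 : Int) + (k : Int) = (k : Int) + 1 by ring]

lemma jobA_nil : jobA [] = [] := by
  rw [jobA]; simp [PySem.List.sorted]

lemma jobA_eq (l : List Char) (h : ¬ l.length = 1) :
    jobA l = (if others PySem.Set.empty l ≠ [] then
        PySem.List.sorted (newFirsts PySem.Set.empty l) (fun c => c) false ++ jobA (others PySem.Set.empty l)
      else PySem.List.sorted (newFirsts PySem.Set.empty l) (fun c => c) false) := by
  rw [jobA, split_eq l [] [] PySem.Set.empty]
  simp [h]

lemma sorted_newFirsts (l : List Char) :
    PySem.List.sorted (newFirsts PySem.Set.empty l) (fun c => c) false = S l := by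
  rw [newFirsts_nil_eq_dedup]; rfl

lemma jobA_eq_F : ∀ (n : Nat) (l : List Char), l.length ≤ n → ∀ M : Int,
    (∀ c ∈ l, (l.count c : Int) ≤ M) → jobA l = F l M := by
  intro n
  induction n with
  | zero =>
    intro l hl M hM
    have : l = [] := List.length_eq_zero_iff.mp (Nat.le_zero.mp hl)
    subst this
    rw [jobA_nil, F_nil]
  | succ n ih =>
    intro l hl M hM
    by_cases h0 : l = []
    · subst h0; rw [jobA_nil, F_nil]
    · obtain ⟨c0, hc0⟩ := List.exists_mem_of_ne_nil l h0
      have hM1 : 1 ≤ M := by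
        have h1 := hM c0 hc0
        have h2 : 1 ≤ l.count c0 := List.count_pos_iff.mpr hc0
        omega
      by_cases h1 : l.length = 1
      · obtain ⟨c, rfl⟩ : ∃ c, l = [c] := List.length_eq_one_iff.mp h1
        rw [jobA]
        simp only [h1, if_pos]
        rw [F_decomp _ M hM1]
        have ho : others PySem.Set.empty [c] = [] := by
          simp [others, PySem.Set.empty]
        rw [ho, F_nil]
        simp [S, PySem.List.dedup, PySem.Set.ofList, PySem.Set.add, PySem.List.sorted, PySem.List.insertBy]
      · rw [jobA_eq l h1, sorted_newFirsts]
        by_cases hr : others PySem.Set.empty l = []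
        · simp only [hr, ne_eq, not_true_eq_false, if_false]
          rw [F_decomp _ M hM1, hr, F_nil, List.append_nil]
        · simp only [ne_eq, hr, not_false_eq_true, if_true]
          rw [F_decomp _ M hM1]
          congr 1
          apply ih
          · have := others_lt l hr
            omega
          · intro c hc
            have hcl2 : 2 ≤ l.count c := (mem_others l c).mp hc
            have hcl : c ∈ l := List.count_pos_iff.mp (by omega)
            have := hM c hcl
            rw [count_others, if_pos hcl]
            omega

lemma values_counter_eq (l : List Char) :
    (PySem.Dict.counter l).values = (PySem.List.dedup l).map (fun k => (l.count k : Int)) := by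
  have h := PySem.Dict.items_counter (xs := l)
  simp [PySem.Dict.values, h]

lemma job_eq_job_alt (s : String) : job s = job_alt s := by
  unfold job job_alt
  rw [PySem.Dict.foldl_insert_getD_add_one_eq_counter]
  dsimp only
  rw [PySem.Dict.keys_counter, ← PySem.List.dedup_eq_ofList]
  congr 1
  by_cases h0 : s.toList = []
  · rw [h0, jobA_nil]
    simp [values_counter_eq, PySem.List.dedup, PySem.Set.ofList, PySem.List.sorted,
      PySem.List.max?, PySem.List.pyRange]
  · set l := s.toList with hl
    obtain ⟨m, hm⟩ : ∃ m, PySem.List.max? (PySem.Dict.counter l).values (fun v => v) = some m := by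
      cases hx : PySem.List.max? (PySem.Dict.counter l).values (fun v => v) with
      | none =>
        exfalso
        have := (PySem.List.max?_eq_none_iff (xs := (PySem.Dict.counter l).values) (key := fun v => v)).mp hx
        rw [values_counter_eq] at this
        simp [PySem.List.dedup_eq_ofList] at this
        apply h0
        cases hl2 : l with
        | nil => rfl
        | cons a b =>
          rw [hl2] at this
          have ha : a ∈ PySem.Set.ofList (a :: b) := (PySem.Set.mem_ofList (xs := a :: b) (y := a)).mpr (by simp)
          rw [this] at ha
          simp at ha
      | some m => exact ⟨m, rfl⟩
    rw [hm]
    have hbound : ∀ c ∈ l, (l.count c : Int) ≤ m := by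
      intro c hc
      have hv : (l.count c : Int) ∈ (PySem.Dict.counter l).values := by
        rw [values_counter_eq]
        exact List.mem_map_of_mem ((PySem.List.mem_dedup l c).mpr hc)
      simpa using PySem.List.max?_isMax hm _ hv
    rw [jobA_eq_F l.length l le_rfl m hbound]
    -- now rewrite the foldl form into F
    unfold F layer S
    simp only [PySem.Dict.getD_counter]
    have hinner : ∀ (i : Int) (acc : List Char),
        (PySem.List.sorted (PySem.List.dedup l) (fun c => c) false).foldl
          (fun acc c => if (l.count c : Int) > i then acc ++ [c] else acc) acc =
        acc ++ (PySem.List.sorted (PySem.List.dedup l) (fun c => c) false).filter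
          (fun c => decide (i < (l.count c : Int))) := by
      intro i acc
      exact PySem.List.foldl_append_ite_eq_filter _ _ _
    have : ((PySem.List.pyRange 0 m 1).foldl (fun acc i =>
        (PySem.List.sorted (PySem.List.dedup l) (fun c => c) false).foldl
          (fun acc c => if (l.count c : Int) > i then acc ++ [c] else acc) acc) []) =
        (PySem.List.pyRange 0 m 1).foldl (fun acc i =>
          acc ++ (PySem.List.sorted (PySem.List.dedup l) (fun c => c) false).filter
            (fun c => decide (i < (l.count c : Int)))) [] := by
      apply PySem.List.foldl_congr_mem
      intro acc i _
      exact hinner i acc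
    rw [this, PySem.List.foldl_append_eq_flatMap]
    simp

-- ===== VERDICT (by name: the statement is the Claim_ definition above) =====
theorem job_spec : Claim_equal_job := by
  intro s _
  unfold Spec_job
  exact job_eq_job_alt s
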